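-- pv_equiv track=rewrite | github.com/enesemretas/mcpath-colab | mcpath/readpdb_strict.py | _trim_to_first_model
-- ===== SOURCE A (Python) =====
-- from typing import Optional, Tuple, Dict, List
--
-- def _trim_to_first_model(pdb_text: List[str]) -> List[str]:
--     has_model = any(l.startswith("MODEL") for l in pdb_text)
--     if not has_model:
--         return pdb_text
--     out, in_model, seen_first = [], False, False
--     for L in pdb_text:
--         if L.startswith("MODEL"):
--             if seen_first: break
--             in_model = True; seen_first = True
--             continue
--         if L.startswith("ENDMDL") and in_model:
--             break
--         if not in_model:
--             if L.startswith(("ATOM  ","HETATM","TER")):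
--                 out.append(L)
--         else:
--             out.append(L)
--     return out
-- ===== SOURCE B (Python) =====
-- from typing import List
--
-- def _trim_to_first_model(pdb_text: List[str]) -> List[str]:
--     i = next((k for k, l in enumerate(pdb_text) if l.startswith("MODEL")), None)
--     if i is None:
--         return pdb_text
--     out = [l for l in pdb_text[:i] if l.startswith(("ATOM  ", "HETATM", "TER"))]
--     for l in pdb_text[i + 1:]:
--         if l.startswith(("ENDMDL", "MODEL")):
--             break
--         out.append(l)
--     return out
-- ===== Notes on version B (the rewrite author's own statement) =====
-- stated objective: alternative
-- what changed: Replaces the single stateful flag-machine (in_model/seen_first booleans threaded through one loop) with a boundary-index decomposition: find the first MODEL line's index, filter the prefix, then copy lines after it until ENDMDL/MODEL.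
import Mathlib
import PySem

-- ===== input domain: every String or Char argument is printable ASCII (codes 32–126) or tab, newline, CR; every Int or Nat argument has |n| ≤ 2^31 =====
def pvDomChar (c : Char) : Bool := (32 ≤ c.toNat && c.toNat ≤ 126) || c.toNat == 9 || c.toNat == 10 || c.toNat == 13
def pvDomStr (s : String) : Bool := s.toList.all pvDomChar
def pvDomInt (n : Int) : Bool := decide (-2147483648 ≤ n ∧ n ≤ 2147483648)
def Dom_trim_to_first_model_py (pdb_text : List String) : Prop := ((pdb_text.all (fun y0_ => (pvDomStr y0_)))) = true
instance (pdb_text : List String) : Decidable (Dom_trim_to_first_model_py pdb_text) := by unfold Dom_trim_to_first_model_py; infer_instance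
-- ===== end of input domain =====

-- B replaces A's stateful flag-machine loop with a boundary-index decomposition
-- (find first MODEL line, filter the prefix, copy until ENDMDL/MODEL); same cost.

-- ===== PORT A =====
-- the filter used for pre-model lines: L.startswith(("ATOM  ","HETATM","TER"))
def pvKeepPre (L : String) : Bool :=
  PySem.Str.startswith L "ATOM  " || PySem.Str.startswith L "HETATM" || PySem.Str.startswith L "TER"

-- A's for-loop over pdb_text with state (out, in_model, seen_first); 'break' = return out
def pvTrimLoopA : List String → List String → Bool → Bool → List String
  | [], out, _, _ => out
  | L :: rest, out, in_model, seen_first =>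
    if PySem.Str.startswith L "MODEL" then
      if seen_first then out
      else pvTrimLoopA rest out true true
    else if PySem.Str.startswith L "ENDMDL" && in_model then out
    else if !in_model then
      if pvKeepPre L then pvTrimLoopA rest (out ++ [L]) in_model seen_first
      else pvTrimLoopA rest out in_model seen_first
    else pvTrimLoopA rest (out ++ [L]) in_model seen_first

def trim_to_first_model_py (pdb_text : List String) : List String :=
  if pdb_text.any (fun l => PySem.Str.startswith l "MODEL") then
    pvTrimLoopA pdb_text [] false false
  else pdb_text

-- ===== PORT B =====
-- index of the first line starting with "MODEL" (next over enumerate, default None)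
def pvFindModelIdx : List String → Option Nat
  | [] => none
  | l :: rest =>
    if PySem.Str.startswith l "MODEL" then some 0
    else (pvFindModelIdx rest).map (· + 1)

-- the append-until-break loop over pdb_text[i+1:]
def pvTakeBody : List String → List String
  | [] => []
  | l :: rest =>
    if PySem.Str.startswith l "ENDMDL" || PySem.Str.startswith l "MODEL" then []
    else l :: pvTakeBody rest

def trim_to_first_model_py_alt (pdb_text : List String) : List String :=
  match pvFindModelIdx pdb_text with
  | none => pdb_text
  | some i => (pdb_text.take i).filter pvKeepPre ++ pvTakeBody (pdb_text.drop (i + 1))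

-- ===== PRECONDITION & SPEC =====
def Spec_trim_to_first_model_py (pdb_text : List String) (out : List String) : Prop := out = trim_to_first_model_py_alt pdb_text
instance (pdb_text : List String) (out : List String) : Decidable (Spec_trim_to_first_model_py pdb_text out) := by unfold Spec_trim_to_first_model_py; infer_instance

-- ===== CLAIM (what is proved, stated in full; the proofs are below) =====
def Claim_equal_trim_to_first_model_py : Prop := ∀ (pdb_text : List String), Dom_trim_to_first_model_py pdb_text → Spec_trim_to_first_model_py pdb_text (trim_to_first_model_py pdb_text)

-- ===== LEMMAS AND PROOFS =====

-- phase 2: once inside the model, A's loop appends lines until ENDMDL/MODEL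
theorem pvTrimLoopA_inModel (xs out : List String) :
    pvTrimLoopA xs out true true = out ++ pvTakeBody xs := by
  induction xs generalizing out with
  | nil => simp [pvTrimLoopA, pvTakeBody]
  | cons l rest ih =>
    by_cases hm : PySem.Str.startswith l "MODEL"
    all_goals by_cases he : PySem.Str.startswith l "ENDMDL"
    all_goals simp at hm he
    all_goals simp [pvTrimLoopA, pvTakeBody, hm, he, ih]

-- phase 1: before any MODEL line, A's loop filters with pvKeepPre and switches phase at MODEL
theorem pvTrimLoopA_pre (xs out : List String) :
    pvTrimLoopA xs out false false =
      match pvFindModelIdx xs with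
      | none => out ++ xs.filter pvKeepPre
      | some i => out ++ ((xs.take i).filter pvKeepPre ++ pvTakeBody (xs.drop (i + 1))) := by
  induction xs generalizing out with
  | nil => simp [pvTrimLoopA, pvFindModelIdx]
  | cons l rest ih =>
    by_cases hm : PySem.Str.startswith l "MODEL"
    · simp at hm
      simp [pvTrimLoopA, pvFindModelIdx, hm, pvTrimLoopA_inModel]
    · simp at hm
      by_cases hk : pvKeepPre l
      all_goals cases hidx : pvFindModelIdx rest with
        | none => simp [pvTrimLoopA, pvFindModelIdx, hm, hk, ih, hidx]
        | some i => simp [pvTrimLoopA, pvFindModelIdx, hm, hk, ih, hidx]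

-- has_model (A's any) agrees with B's index search
theorem pvFindModelIdx_none_iff (xs : List String) :
    pvFindModelIdx xs = none ↔ xs.any (fun l => PySem.Str.startswith l "MODEL") = false := by
  induction xs with
  | nil => simp [pvFindModelIdx]
  | cons l rest ih =>
    by_cases hm : PySem.Str.startswith l "MODEL"
    all_goals simp at hm
    · simp [pvFindModelIdx, hm]
    · simp [pvFindModelIdx, hm, ih]

-- ===== VERDICT (by name: the statement is the Claim_ definition above) =====
theorem trim_to_first_model_py_spec : Claim_equal_trim_to_first_model_py := by
  intro pdb_text _
  unfold Spec_trim_to_first_model_py trim_to_first_model_py trim_to_first_model_py_alt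
  by_cases h : pdb_text.any (fun l => PySem.Str.startswith l "MODEL")
  · have hne : pvFindModelIdx pdb_text ≠ none := by
      intro hnone
      rw [(pvFindModelIdx_none_iff pdb_text).mp hnone] at h
      exact Bool.false_ne_true h
    cases hidx : pvFindModelIdx pdb_text with
    | none => exact absurd hidx hne
    | some i =>
      rw [if_pos h, pvTrimLoopA_pre, hidx]
      simp
  · have hnone : pvFindModelIdx pdb_text = none := by
      apply (pvFindModelIdx_none_iff pdb_text).mpr
      exact Bool.not_eq_true _ ▸ Bool.of_not_eq_true h
    simp only [h, hnone]
    split <;> simp_all
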